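-- pv_equiv track=rewrite | github.com/jiangnanqw12/test-code | 001_markdown/md_helper.py | downgrade_heads
-- ===== SOURCE A (Python) =====
-- def downgrade_heads(content, downgrade_level):
--     lines = content.split('\n')
--     new_lines = []
--     for line in lines:
--         head_level = 0
--         for char in line:
--             if char == '#':
--                 head_level += 1
--             else:
--                 break
--         if head_level > 0:
--             new_head_level = head_level + downgrade_level
--             if new_head_level > 6:
--                 new_head_level = 6
--             new_line = '#' * new_head_level + line[head_level:]
--             new_lines.append(new_line)
--         else:
--             new_lines.append(line)
--     return '\n'.join(new_lines)
-- ===== SOURCE B (Python) =====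
-- def downgrade_heads(content, downgrade_level):
--     # single left-to-right pass; no split/join, headings rewritten in place
--     out = []
--     i, n = 0, len(content)
--     at_start = True
--     while i < n:
--         c = content[i]
--         if at_start and c == '#':
--             j = i
--             while j < n and content[j] == '#':
--                 j += 1
--             out.append('#' * min(j - i + downgrade_level, 6))
--             i = j
--             at_start = False
--         else:
--             out.append(c)
--             at_start = (c == '\n')
--             i += 1
--     return ''.join(out)
-- ===== Notes on version B (the rewrite author's own statement) =====
-- stated objective: alternative
-- what changed: A splits the content into lines, rebuilds each line (inner char loop to count hashes, string concatenation) and joins them back; B makes a single left-to-right scan over the characters with an at-line-start flag, rewriting each leading hash run in place and copying everything else.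
import Mathlib
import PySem

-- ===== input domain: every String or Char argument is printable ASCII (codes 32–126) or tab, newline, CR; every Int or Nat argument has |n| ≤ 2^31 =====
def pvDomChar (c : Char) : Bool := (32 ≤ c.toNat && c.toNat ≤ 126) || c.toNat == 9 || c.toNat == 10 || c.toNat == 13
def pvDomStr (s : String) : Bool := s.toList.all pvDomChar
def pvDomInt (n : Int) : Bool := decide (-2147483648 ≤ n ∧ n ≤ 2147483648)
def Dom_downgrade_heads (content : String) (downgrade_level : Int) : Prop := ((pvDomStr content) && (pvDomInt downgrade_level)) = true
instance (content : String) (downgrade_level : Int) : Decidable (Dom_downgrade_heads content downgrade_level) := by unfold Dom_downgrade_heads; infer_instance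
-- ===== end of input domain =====

-- B replaces A's split-into-lines / rebuild-each-line / join pipeline by a single
-- left-to-right scan that rewrites each heading's hash run in place (objective: alternative).

-- ===== PORT A =====
-- the inner 'for char in line: … break' loop of A
def headLevelA : List Char → Nat
  | [] => 0
  | c :: r => if c = '#' then headLevelA r + 1 else 0

def downgrade_heads (content : String) (downgrade_level : Int) : String :=
  let lines := PySem.Chars.splitOn content.toList ['\n']
  let new_lines := lines.foldl (fun acc line =>
    let head_level := headLevelA line
    if 0 < head_level then
      let new_head_level : Int := (head_level : Int) + downgrade_level
      let new_head_level : Int := if 6 < new_head_level then 6 else new_head_level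
      -- '#' * n is '' for n ≤ 0, exactly toNat-clamped replicate; line[head_level:] with 0 ≤ head_level ≤ len
      acc ++ [List.replicate new_head_level.toNat '#' ++ PySem.List.slice line (some (head_level : Int)) none]
    else acc ++ [line]) []
  String.ofList (PySem.Chars.join ['\n'] new_lines)

-- ===== PORT B =====
-- Source B's single pass: 'goB' is the at_start = True state, 'emitB' the at_start = False state
mutual
def goB (d : Int) : List Char → List Char
  | [] => []
  | c :: cs =>
    if _h : c = '#' then
      -- Source B scans the hash run content[i:j] once; run = that slice
      List.replicate (min (((List.takeWhile (· == '#') (c :: cs)).length : Int) + d) 6).toNat '#'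
        ++ emitB d (List.drop (List.takeWhile (· == '#') (c :: cs)).length (c :: cs))
    else emitB d (c :: cs)
termination_by l => (l.length, 1)
decreasing_by
  · have h2 : List.takeWhile (· == '#') (c :: cs) = c :: List.takeWhile (· == '#') cs := by
      simp [List.takeWhile_cons, _h]
    simp [h2]; omega
  · exact Prod.Lex.right _ (by omega)


def emitB (d : Int) : List Char → List Char
  | [] => []
  | c :: cs => if c = '\n' then '\n' :: goB d cs else c :: emitB d cs
termination_by l => (l.length, 0)
decreasing_by
  · simp only [List.length_cons]; exact Prod.Lex.left _ _ (by omega)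
  · simp only [List.length_cons]; exact Prod.Lex.left _ _ (by omega)
end

def downgrade_heads_alt (content : String) (downgrade_level : Int) : String :=
  String.ofList (goB downgrade_level content.toList)

-- ===== PRECONDITION & SPEC =====
def Spec_downgrade_heads (content : String) (downgrade_level : Int) (out : String) : Prop := out = downgrade_heads_alt content downgrade_level
instance (content : String) (downgrade_level : Int) (out : String) : Decidable (Spec_downgrade_heads content downgrade_level out) := by unfold Spec_downgrade_heads; infer_instance

-- ===== CLAIM (what is proved, stated in full; the proofs are below) =====
def Claim_equal_downgrade_heads : Prop := ∀ (content : String) (downgrade_level : Int), Dom_downgrade_heads content downgrade_level → Spec_downgrade_heads content downgrade_level (downgrade_heads content downgrade_level)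

-- ===== LEMMAS AND PROOFS =====

-- reference split of a char list at '\n' (specification of A's content.split('\n'))
def splitNL : List Char → List (List Char)
  | [] => [[]]
  | c :: r => if c = '\n' then [] :: splitNL r else (splitNL r).modifyHead (c :: ·)

-- reference '\n'.join
def joinNL : List (List Char) → List Char
  | [] => []
  | [x] => x
  | x :: y :: xs => x ++ '\n' :: joinNL (y :: xs)

-- A's per-line transformation
def tA (d : Int) (line : List Char) : List Char :=
  if 0 < headLevelA line then
    List.replicate (if 6 < (headLevelA line : Int) + d then (6:Int) else (headLevelA line : Int) + d).toNat '#'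
      ++ List.drop (headLevelA line) line
  else line

def mapTail (f : List Char → List Char) : List (List Char) → List (List Char)
  | [] => []
  | h :: t => h :: t.map f

-- what A computes on a char list
def FA (d : Int) (cs : List Char) : List Char := joinNL ((splitNL cs).map (tA d))
-- what A computes from the middle of a line (first line untouched)
def EA (d : Int) (cs : List Char) : List Char := joinNL (mapTail (tA d) (splitNL cs))

lemma splitNL_takeWhile : ∀ t : List Char, ∃ tl, splitNL t = t.takeWhile (fun c => !(c = '\n')) :: tl := by
  intro t
  induction t with
  | nil => exact ⟨[], rfl⟩
  | cons c r ih =>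
    obtain ⟨tl, h⟩ := ih
    by_cases hc : c = '\n'
    · exact ⟨splitNL r, by simp [splitNL, hc, List.takeWhile_cons]⟩
    · exact ⟨tl, by simp [splitNL, hc, h, List.takeWhile_cons]⟩

lemma splitNL_hash_prefix : ∀ (run : List Char) (t h : List Char) (tl : List (List Char)),
    (∀ c ∈ run, c = '#') → splitNL t = h :: tl → splitNL (run ++ t) = (run ++ h) :: tl := by
  intro run
  induction run with
  | nil => intro t h tl _ ht; simpa using ht
  | cons c r ih =>
    intro t h tl hall ht
    have hc : c = '#' := hall c (by simp)
    have hr : splitNL (r ++ t) = (r ++ h) :: tl := ih t h tl (fun x hx => hall x (by simp [hx])) ht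
    simp [splitNL, hc, hr]

lemma headLevelA_append : ∀ (run h : List Char), (∀ c ∈ run, c = '#') → h.head? ≠ some '#' →
    headLevelA (run ++ h) = run.length := by
  intro run
  induction run with
  | nil =>
    intro h _ hh
    cases h with
    | nil => rfl
    | cons c r => simp at hh; simp [headLevelA, hh]
  | cons c r ih =>
    intro h hall hh
    have hc : c = '#' := hall c (by simp)
    have := ih h (fun x hx => hall x (by simp [hx])) hh
    simp [headLevelA, hc, this]

lemma joinNL_append_head (a h : List Char) (xs : List (List Char)) :
    joinNL ((a ++ h) :: xs) = a ++ joinNL (h :: xs) := by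
  cases xs with
  | nil => simp [joinNL]
  | cons y ys => simp [joinNL]

lemma tA_hash (d : Int) (run h : List Char) (hr : run ≠ []) (hall : ∀ c ∈ run, c = '#')
    (hh : h.head? ≠ some '#') :
    tA d (run ++ h) = List.replicate (min ((run.length : Int) + d) 6).toNat '#' ++ h := by
  have hl := headLevelA_append run h hall hh
  have hpos : 0 < headLevelA (run ++ h) := by
    rw [hl]; cases run with | nil => exact absurd rfl hr | cons _ _ => simp
  have hmin : (if 6 < (run.length : Int) + d then (6:Int) else (run.length : Int) + d)
      = min ((run.length : Int) + d) 6 := by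
    rw [min_def]; split_ifs <;> omega
  rw [tA, if_pos hpos, hl, hmin, List.drop_left]

-- the takeWhile-(≠'\n') head of the dropWhile-'#' tail never starts with '#'
lemma head_after_hashes (cs : List Char) :
    ((cs.dropWhile (· == '#')).takeWhile (fun c => !(c = '\n'))).head? ≠ some '#' := by
  generalize ht : cs.dropWhile (· == '#') = t
  cases t with
  | nil => simp
  | cons c r =>
    have hc : ¬ (c == '#') = true := by
      have := List.head?_dropWhile_not (· == '#') cs
      rw [ht] at this; simpa using this
    by_cases hcn : c = '\n'
    · simp [List.takeWhile_cons, hcn]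
    · simp [List.takeWhile_cons, hcn]
      intro h; exact hc (by simp [h])

lemma drop_takeWhile_length (p : Char → Bool) : ∀ l : List Char,
    List.drop (l.takeWhile p).length l = l.dropWhile p := by
  intro l
  induction l with
  | nil => rfl
  | cons c cs ih =>
    by_cases hc : p c
    · simp [List.takeWhile_cons, List.dropWhile_cons, hc, ih]
    · simp [List.takeWhile_cons, List.dropWhile_cons, hc]

lemma headLevelA_eq_zero (h : List Char) (hh : h.head? ≠ some '#') : headLevelA h = 0 := by
  cases h with
  | nil => rfl
  | cons c r =>
    have : c ≠ '#' := by intro hc; exact hh (by simp [hc])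
    simp [headLevelA, this]

-- the key decomposition of A's value at a line start
lemma FA_decomp (d : Int) (cs : List Char) :
    FA d cs = (if cs.takeWhile (· == '#') = [] then []
               else List.replicate (min (((cs.takeWhile (· == '#')).length : Int) + d) 6).toNat '#')
              ++ EA d (cs.dropWhile (· == '#')) := by
  set run := cs.takeWhile (· == '#') with hrun
  set t := cs.dropWhile (· == '#') with ht
  have hct : run ++ t = cs := List.takeWhile_append_dropWhile
  have hall : ∀ c ∈ run, c = '#' := by
    intro c hc
    have := List.mem_takeWhile_imp (hrun ▸ hc)
    simpa using this
  obtain ⟨tl, hsplit⟩ := splitNL_takeWhile t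
  set h := t.takeWhile (fun c => !(c = '\n')) with hh
  have hhd : h.head? ≠ some '#' := head_after_hashes cs
  have hcs : splitNL cs = (run ++ h) :: tl := by
    rw [← hct]; exact splitNL_hash_prefix run t h tl hall hsplit
  by_cases hr : run = []
  · have hcst : cs = t := by rw [← hct, hr]; simp
    rw [if_pos hr, List.nil_append, hcst, FA, EA, hsplit]
    simp [mapTail, tA, headLevelA_eq_zero h hhd]
  · rw [if_neg hr, FA, hcs]
    simp only [List.map_cons]
    rw [tA_hash d run h hr hall hhd, joinNL_append_head, EA, hsplit]
    rfl

lemma EA_newline (d : Int) (r : List Char) : EA d ('\n' :: r) = '\n' :: FA d r := by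
  obtain ⟨tl, hs⟩ := splitNL_takeWhile r
  have h1 : splitNL ('\n' :: r) = [] :: splitNL r := by simp [splitNL]
  rw [EA, FA, h1, hs]
  simp [mapTail, joinNL]

lemma EA_cons (d : Int) (c : Char) (r : List Char) (hc : c ≠ '\n') :
    EA d (c :: r) = c :: EA d r := by
  obtain ⟨tl, hs⟩ := splitNL_takeWhile r
  have h1 : splitNL (c :: r) = (c :: r.takeWhile (fun c => !(c = '\n'))) :: tl := by
    simp [splitNL, hc, hs]
  rw [EA, EA, h1, hs]
  cases tl with
  | nil => simp [mapTail, joinNL]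
  | cons y ys => simp [mapTail, joinNL]

-- B's scan computes A's value, jointly for the two states
lemma scan_eq (d : Int) : ∀ n (cs : List Char), cs.length ≤ n →
    emitB d cs = EA d cs ∧ goB d cs = FA d cs := by
  intro n
  induction n with
  | zero =>
    intro cs hcs
    have : cs = [] := List.eq_nil_of_length_eq_zero (Nat.le_zero.mp hcs)
    subst this
    constructor
    · simp [emitB, EA, splitNL, joinNL, mapTail]
    · simp [goB, FA, splitNL, joinNL, tA, headLevelA, mapTail]
  | succ n ih =>
    intro cs hcs
    have hemit : emitB d cs = EA d cs := by
      cases cs with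
      | nil => simp [emitB, EA, splitNL, joinNL, mapTail]
      | cons c r =>
        by_cases hc : c = '\n'
        · subst hc
          rw [emitB, if_pos rfl, EA_newline]
          have := (ih r (by simpa using Nat.lt_succ_iff.mp (Nat.lt_of_lt_of_le (by simp) hcs))).2
          rw [this]
        · rw [emitB, if_neg hc, EA_cons d c r hc]
          have := (ih r (by simp at hcs; omega)).1
          rw [this]
    refine ⟨hemit, ?_⟩
    cases cs with
    | nil =>
      simp [goB, FA, splitNL, joinNL, tA, headLevelA, mapTail]
    | cons c r =>
      rw [FA_decomp]
      by_cases hc : c = '#'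
      · rw [goB, dif_pos hc]

        have htw : (c :: r).takeWhile (· == '#') ≠ [] := by
          simp [List.takeWhile_cons, hc]
        rw [if_neg htw]
        have hdw : List.drop ((c :: r).takeWhile (· == '#')).length (c :: r)
            = (c :: r).dropWhile (· == '#') := drop_takeWhile_length _ _
        have hlen : (List.drop ((c :: r).takeWhile (· == '#')).length (c :: r)).length ≤ n := by
          have : ((c :: r).takeWhile (· == '#')).length ≥ 1 := by
            simp [List.takeWhile_cons, hc]
          simp at hcs ⊢
          omega
        have := (ih _ hlen).1
        rw [this, hdw]
      · rw [goB, dif_neg hc]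
        have htw : (c :: r).takeWhile (· == '#') = [] := by
          simp [List.takeWhile_cons, hc]
        have hdw : (c :: r).dropWhile (· == '#') = c :: r := by
          simp [List.dropWhile_cons, hc]
        rw [htw, if_pos rfl, hdw, List.nil_append, hemit]

-- PySem's split('\n') is the reference split
lemma splitOn_go_nl : ∀ (fuel : Nat) (l cur : List Char) (acc : List (List Char)),
    l.length < fuel →
    PySem.Chars.splitOn.go ['\n'] fuel l cur acc
      = acc.reverse ++ (splitNL l).modifyHead (cur.reverse ++ ·) := by
  intro fuel
  induction fuel with
  | zero => intro l cur acc h; omega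
  | succ fuel ih =>
    intro l cur acc h
    cases l with
    | nil => simp [PySem.Chars.splitOn.go, splitNL]
    | cons c rest =>
      by_cases hc : c = '\n'
      · subst hc
        rw [PySem.Chars.splitOn.go]
        have hpre : List.isPrefixOf ['\n'] ('\n' :: rest) = true := by simp [List.isPrefixOf]
        rw [if_pos hpre]
        have hd : List.drop (['\n'] : List Char).length ('\n' :: rest) = rest := rfl
        simp only [List.length_cons] at h
        rw [hd, ih rest [] (cur.reverse :: acc) (by omega)]
        obtain ⟨tl, hs⟩ := splitNL_takeWhile rest
        simp [splitNL, hs]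
      · rw [PySem.Chars.splitOn.go]
        have hpre : List.isPrefixOf ['\n'] (c :: rest) = false := by
          simp [List.isPrefixOf]; exact fun h => absurd h.symm hc
        rw [if_neg (by simp [hpre])]
        simp only [List.length_cons] at h
        rw [ih rest (c :: cur) acc (by omega)]
        obtain ⟨tl, hs⟩ := splitNL_takeWhile rest
        simp [splitNL, hc, hs]

lemma splitOn_nl (l : List Char) : PySem.Chars.splitOn l ['\n'] = splitNL l := by
  rw [PySem.Chars.splitOn, splitOn_go_nl (l.length + 1) l [] [] (by omega)]
  obtain ⟨tl, hs⟩ := splitNL_takeWhile l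
  simp [hs]

lemma join_nl_eq_joinNL : ∀ xs : List (List Char), PySem.Chars.join ['\n'] xs = joinNL xs := by
  intro xs
  induction xs with
  | nil => simp [PySem.Chars.join, joinNL, List.intercalate]
  | cons x ys ih =>
    cases ys with
    | nil => simp [PySem.Chars.join, joinNL, List.intercalate]
    | cons y zs =>
      rw [joinNL, ← ih]
      simp [PySem.Chars.join, List.intercalate, List.intersperse]

lemma portA_eq_FA (content : String) (d : Int) :
    downgrade_heads content d = String.ofList (FA d content.toList) := by
  rw [downgrade_heads]
  have hbody : (fun (acc : List (List Char)) (line : List Char) =>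
      let head_level := headLevelA line
      if 0 < head_level then
        let nh : Int := (head_level : Int) + d
        let nh : Int := if 6 < nh then 6 else nh
        acc ++ [List.replicate nh.toNat '#' ++ PySem.List.slice line (some (head_level : Int)) none]
      else acc ++ [line]) = fun acc line => acc ++ [tA d line] := by
    funext acc line
    simp only [PySem.List.slice_from_natCast, tA]
    split_ifs with h <;> rfl
  rw [hbody, PySem.List.foldl_append_singleton_eq_map, splitOn_nl, join_nl_eq_joinNL]
  rfl

-- ===== VERDICT (by name: the statement is the Claim_ definition above) =====
theorem downgrade_heads_spec : Claim_equal_downgrade_heads := by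
  intro content d _
  show downgrade_heads content d = downgrade_heads_alt content d
  rw [portA_eq_FA, downgrade_heads_alt, (scan_eq d content.toList.length content.toList le_rfl).2]
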